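-- pv_equiv track=rewrite | github.com/streetartist/algonode | app.py | get_node_category
-- ===== SOURCE A (Python) =====
-- def get_node_category(ntype: str) -> str:
--     """Get human-readable category name for a node type."""
--     categories = {
--         "math/": "数学运算 (Mathematical Operations)",
--         "data/": "数据处理 (Data Processing)",
--         "algo/": "算法 (Algorithms)",
--         "viz/": "可视化 (Visualization)",
--         "model/": "模型训练 (Model Training)",
--         "class/": "分类算法 (Classification)",
--         "eval/": "评估方法 (Evaluation Methods)",
--         "stat/": "统计分析 (Statistical Analysis)",
--         "signal/": "信号处理 (Signal Processing)",
--         "symbolic/": "符号计算 (Symbolic Computation)",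
--         "control/": "控制系统 (Control Systems)",
--         "io/": "输入输出 (Input/Output)",
--         "graph/": "子图 (Subgraph)",
--         "custom/": "自定义 (Custom)",
--         "queue/": "排队论 (Queueing Theory)"
--     }
--     for prefix, category in categories.items():
--         if ntype.startswith(prefix):
--             return category
--     return "其他 (Other)"
-- ===== SOURCE B (Python) =====
-- def _category_of(key: str) -> str:
--     """Map an exact 'prefix/' key to its category name via an explicit branch chain."""
--     if key == "math/":
--         return "数学运算 (Mathematical Operations)"
--     elif key == "data/":
--         return "数据处理 (Data Processing)"
--     elif key == "algo/":
--         return "算法 (Algorithms)"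
--     elif key == "viz/":
--         return "可视化 (Visualization)"
--     elif key == "model/":
--         return "模型训练 (Model Training)"
--     elif key == "class/":
--         return "分类算法 (Classification)"
--     elif key == "eval/":
--         return "评估方法 (Evaluation Methods)"
--     elif key == "stat/":
--         return "统计分析 (Statistical Analysis)"
--     elif key == "signal/":
--         return "信号处理 (Signal Processing)"
--     elif key == "symbolic/":
--         return "符号计算 (Symbolic Computation)"
--     elif key == "control/":
--         return "控制系统 (Control Systems)"
--     elif key == "io/":
--         return "输入输出 (Input/Output)"
--     elif key == "graph/":
--         return "子图 (Subgraph)"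
--     elif key == "custom/":
--         return "自定义 (Custom)"
--     elif key == "queue/":
--         return "排队论 (Queueing Theory)"
--     else:
--         return "其他 (Other)"
--
--
-- def get_node_category(ntype: str) -> str:
--     """Get human-readable category name for a node type."""
--     i = ntype.find("/")
--     if i < 0:
--         return "其他 (Other)"
--     return _category_of(ntype[:i + 1])
-- ===== Notes on version B (the rewrite author's own statement) =====
-- stated objective: simpler
-- what changed: Instead of scanning a dict with startswith for each of the 15 prefixes, B slices ntype up to its first '/' (inclusive) once and resolves that exact key with a direct branch chain, so no prefix scan over the input remains.
import Mathlib
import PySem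

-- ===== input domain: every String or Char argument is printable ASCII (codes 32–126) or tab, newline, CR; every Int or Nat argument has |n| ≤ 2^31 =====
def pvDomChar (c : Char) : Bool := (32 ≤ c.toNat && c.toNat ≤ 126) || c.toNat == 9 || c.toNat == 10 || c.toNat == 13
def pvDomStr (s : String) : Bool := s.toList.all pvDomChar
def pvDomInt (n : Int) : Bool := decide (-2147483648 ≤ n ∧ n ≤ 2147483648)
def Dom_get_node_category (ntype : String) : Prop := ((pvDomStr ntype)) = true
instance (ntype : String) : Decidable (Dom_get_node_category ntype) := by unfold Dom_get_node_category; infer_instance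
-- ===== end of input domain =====

-- B replaces A's startswith-scan over the category dict by slicing ntype up to its first '/'
-- (inclusive) once and resolving that exact key with a plain branch chain (objective: simpler).

-- ===== PORT A =====
-- the category dict literal of A
def pvCats : List (String × String) :=
  [("math/", "数学运算 (Mathematical Operations)"),
   ("data/", "数据处理 (Data Processing)"),
   ("algo/", "算法 (Algorithms)"),
   ("viz/", "可视化 (Visualization)"),
   ("model/", "模型训练 (Model Training)"),
   ("class/", "分类算法 (Classification)"),
   ("eval/", "评估方法 (Evaluation Methods)"),
   ("stat/", "统计分析 (Statistical Analysis)"),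
   ("signal/", "信号处理 (Signal Processing)"),
   ("symbolic/", "符号计算 (Symbolic Computation)"),
   ("control/", "控制系统 (Control Systems)"),
   ("io/", "输入输出 (Input/Output)"),
   ("graph/", "子图 (Subgraph)"),
   ("custom/", "自定义 (Custom)"),
   ("queue/", "排队论 (Queueing Theory)")]

-- the 'for prefix, category in categories.items(): if ntype.startswith(prefix): return category' loop
def pvLoopA (ntype : String) : List (String × String) → String
  | [] => "其他 (Other)"
  | (p, c) :: rest => if PySem.Str.startswith ntype p then c else pvLoopA ntype rest

def get_node_category (ntype : String) : String :=
  let categories : PySem.Dict String String := PySem.Dict.mk pvCats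
  pvLoopA ntype categories.items

-- ===== PORT B =====
-- B's helper _category_of: an elif chain on the exact 'prefix/' key
def pvCategoryOf (key : String) : String :=
  if key == "math/" then "数学运算 (Mathematical Operations)"
  else if key == "data/" then "数据处理 (Data Processing)"
  else if key == "algo/" then "算法 (Algorithms)"
  else if key == "viz/" then "可视化 (Visualization)"
  else if key == "model/" then "模型训练 (Model Training)"
  else if key == "class/" then "分类算法 (Classification)"
  else if key == "eval/" then "评估方法 (Evaluation Methods)"
  else if key == "stat/" then "统计分析 (Statistical Analysis)"
  else if key == "signal/" then "信号处理 (Signal Processing)"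
  else if key == "symbolic/" then "符号计算 (Symbolic Computation)"
  else if key == "control/" then "控制系统 (Control Systems)"
  else if key == "io/" then "输入输出 (Input/Output)"
  else if key == "graph/" then "子图 (Subgraph)"
  else if key == "custom/" then "自定义 (Custom)"
  else if key == "queue/" then "排队论 (Queueing Theory)"
  else "其他 (Other)"

def get_node_category_alt (ntype : String) : String :=
  let i := PySem.Str.find ntype "/"
  if i < 0 then "其他 (Other)"
  else pvCategoryOf (PySem.Str.slice ntype none (some (i + 1)))

-- ===== PRECONDITION & SPEC =====
def Spec_get_node_category (ntype : String) (out : String) : Prop := out = get_node_category_alt ntype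
instance (ntype : String) (out : String) : Decidable (Spec_get_node_category ntype out) := by unfold Spec_get_node_category; infer_instance

-- ===== CLAIM (what is proved, stated in full; the proofs are below) =====
def Claim_equal_get_node_category : Prop := ∀ (ntype : String), Dom_get_node_category ntype → Spec_get_node_category ntype (get_node_category ntype)

-- ===== LEMMAS AND PROOFS =====

-- a singleton list is a prefix iff it is the head
theorem pv_singleton_prefix (c : Char) (m : List Char) : [c] <+: m ↔ m.head? = some c := by
  cases m <;> simp [List.cons_prefix_cons, eq_comm]

-- '/' occurs in l iff ['/'] is an infix of l
theorem pv_mem_iff_infix (l : List Char) : ('/' : Char) ∈ l ↔ ['/'] <:+: l := by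
  constructor
  · intro h
    obtain ⟨s, t, rfl⟩ := List.append_of_mem h
    exact ⟨s, t, by simp⟩
  · intro ⟨s, t, h⟩
    subst h; simp

-- characterisation of B's key: for a prefix "q/" with no earlier slash,
-- ntype.startswith("q/") iff the slice up to the first '/' (inclusive) equals "q/"
theorem pv_key_iff (l q : List Char) (hq : ('/' : Char) ∉ q) (hin : ('/' : Char) ∈ l) :
    (q ++ ['/']) <+: l ↔ l.take ((PySem.Chars.find l ['/']).toNat + 1) = q ++ ['/'] := by
  have hnn : 0 ≤ PySem.Chars.find l ['/'] :=
    (PySem.Chars.find_nonneg_iff _ _).mpr ((pv_mem_iff_infix l).mp hin)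
  obtain ⟨hpre, hmin⟩ := PySem.Chars.find_spec hnn
  set j := (PySem.Chars.find l ['/']).toNat with hj
  constructor
  · rintro ⟨t, rfl⟩
    have hlen : j = q.length := by
      have h1 : ¬ q.length < j := by
        intro h
        exact hmin q.length h (by
          rw [pv_singleton_prefix, List.head?_drop, List.append_assoc]
          simp)
      have h2 : ¬ j < q.length := by
        intro h
        have hh := (pv_singleton_prefix _ _).mp hpre
        rw [List.head?_drop, List.append_assoc, List.getElem?_append_left h] at hh
        exact hq (List.mem_of_getElem? hh)
      omega
    rw [hlen]
    have hl : (q ++ ['/']).length = q.length + 1 := by simp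
    rw [← hl, List.take_left]
  · intro h
    rw [← h]
    exact List.take_prefix _ _

-- per-entry bridge, '/' present: A's startswith test equals B's key comparison
theorem pv_case (ntype q p : String) (hin : ('/' : Char) ∈ ntype.toList)
    (hp : p.toList = q.toList ++ ['/']) (hq : ('/' : Char) ∉ q.toList) :
    PySem.Str.startswith ntype p
      = (p == PySem.Str.slice ntype none (some (PySem.Str.find ntype "/" + 1))) := by
  have hnn : 0 ≤ PySem.Chars.find ntype.toList ['/'] :=
    (PySem.Chars.find_nonneg_iff _ _).mpr ((pv_mem_iff_infix _).mp hin)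
  rw [Bool.eq_iff_iff]
  rw [PySem.Str.startswith_eq, PySem.Chars.startswith_iff, beq_iff_eq]
  have hkey : (PySem.Str.slice ntype none (some (PySem.Str.find ntype "/" + 1))).toList
      = ntype.toList.take ((PySem.Chars.find ntype.toList ['/']).toNat + 1) := by
    rw [PySem.Str.toList_slice, PySem.Chars.slice_eq_listSlice]
    have h1 : PySem.Str.find ntype "/" = PySem.Chars.find ntype.toList ['/'] := by
      simp [PySem.Str.find_eq]
    have hb : (0:Int) ≤ PySem.Chars.find ntype.toList ['/'] + 1 := by omega
    rw [h1, PySem.List.slice_to ntype.toList hb]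
    congr 1
    omega
  constructor
  · intro h
    rw [hp] at h
    have := (pv_key_iff ntype.toList q.toList hq hin).mp h
    apply String.toList_injective
    rw [hkey, hp, this]
  · intro h
    rw [hp]
    apply (pv_key_iff ntype.toList q.toList hq hin).mpr
    rw [← hp, ← hkey, h]

-- per-entry bridge, no '/': the startswith test is false
theorem pv_case_false (ntype p : String) (hnin : ('/' : Char) ∉ ntype.toList)
    (hp : ('/' : Char) ∈ p.toList) : PySem.Str.startswith ntype p = false := by
  rw [PySem.Str.startswith_eq]
  rw [Bool.eq_false_iff, Ne, Bool.eq_iff_iff]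
  simp only [PySem.Chars.startswith_iff, iff_true]
  intro h
  exact hnin (h.sublist.subset hp)

-- A's scan equals an assoc-list lookup when each test agrees with the key comparison
theorem pv_chain (n k : String) (ps : List (String × String))
    (h : ∀ pc ∈ ps, PySem.Str.startswith n pc.1 = (pc.1 == k)) :
    pvLoopA n ps = ((PySem.Dict.mk ps).get? k).getD "其他 (Other)" := by
  induction ps with
  | nil => simp [pvLoopA, PySem.Dict.get?]
  | cons pc rest ih =>
    obtain ⟨p, c⟩ := pc
    have hh := h (p, c) (by simp)
    simp only [pvLoopA, PySem.Dict.get?, List.find?_cons] at *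
    rw [hh]
    cases hpk : (p == k) with
    | true => simp
    | false =>
      simp only [Bool.false_eq_true, if_false]
      have := ih (fun pc hpc => h pc (by simp [hpc]))
      simpa [PySem.Dict.get?, PySem.Dict.items] using this

-- A's scan returns the default when every test is false
theorem pv_chain_false (n : String) (ps : List (String × String))
    (h : ∀ pc ∈ ps, PySem.Str.startswith n pc.1 = false) :
    pvLoopA n ps = "其他 (Other)" := by
  induction ps with
  | nil => rfl
  | cons pc rest ih =>
    obtain ⟨p, c⟩ := pc
    have hh := h (p, c) (by simp)
    simp only [pvLoopA, hh, Bool.false_eq_true, if_false]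
    exact ih (fun pc hpc => h pc (by simp [hpc]))

-- the assoc-list lookup over the category dict IS B's branch chain
-- Option.getD distributes over an if-then-some chain
theorem pv_getD_ite {α : Type} (c : Prop) [Decidable c] (a : α) (o : Option α) (d : α) :
    (if c then some a else o).getD d = if c then a else o.getD d := by
  split_ifs <;> rfl

set_option maxHeartbeats 1000000 in
theorem pv_lookup (k : String) :
    ((PySem.Dict.mk pvCats).get? k).getD "其他 (Other)" = pvCategoryOf k := by
  unfold pvCats pvCategoryOf
  simp only [PySem.Dict.get?_mk_cons, Bool.beq_comm, pv_getD_ite]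
  simp [PySem.Dict.get?]

-- ===== VERDICT (by name: the statement is the Claim_ definition above) =====
theorem get_node_category_spec : Claim_equal_get_node_category := by
  intro ntype _
  unfold Spec_get_node_category get_node_category get_node_category_alt
  by_cases hmem : ('/' : Char) ∈ ntype.toList
  · have hnn : 0 ≤ PySem.Chars.find ntype.toList ['/'] :=
      (PySem.Chars.find_nonneg_iff _ _).mpr ((pv_mem_iff_infix _).mp hmem)
    have hfind : PySem.Str.find ntype "/" = PySem.Chars.find ntype.toList ['/'] := by
      simp [PySem.Str.find_eq]
    have hnlt : ¬ PySem.Str.find ntype "/" < 0 := by rw [hfind]; omega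
    simp only [hnlt, if_false]
    rw [← pv_lookup]
    apply pv_chain
    intro pc hpc
    fin_cases hpc
    · exact pv_case ntype "math" _ hmem (by decide) (by decide)
    · exact pv_case ntype "data" _ hmem (by decide) (by decide)
    · exact pv_case ntype "algo" _ hmem (by decide) (by decide)
    · exact pv_case ntype "viz" _ hmem (by decide) (by decide)
    · exact pv_case ntype "model" _ hmem (by decide) (by decide)
    · exact pv_case ntype "class" _ hmem (by decide) (by decide)
    · exact pv_case ntype "eval" _ hmem (by decide) (by decide)
    · exact pv_case ntype "stat" _ hmem (by decide) (by decide)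
    · exact pv_case ntype "signal" _ hmem (by decide) (by decide)
    · exact pv_case ntype "symbolic" _ hmem (by decide) (by decide)
    · exact pv_case ntype "control" _ hmem (by decide) (by decide)
    · exact pv_case ntype "io" _ hmem (by decide) (by decide)
    · exact pv_case ntype "graph" _ hmem (by decide) (by decide)
    · exact pv_case ntype "custom" _ hmem (by decide) (by decide)
    · exact pv_case ntype "queue" _ hmem (by decide) (by decide)
  · have hneg : PySem.Str.find ntype "/" = -1 := by
      rw [PySem.Str.find_eq_neg_one_iff]
      intro h
      exact hmem ((pv_mem_iff_infix _).mpr (by simpa using h))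
    simp only [hneg]
    norm_num
    apply pv_chain_false
    intro pc hpc
    fin_cases hpc <;> exact pv_case_false ntype _ hmem (by decide)
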